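-- pv_equiv track=rewrite | github.com/AbanobSoliman/DH-PTAM | backend.py | get_black_white_indices
-- ===== SOURCE A (Python) =====
-- def get_black_white_indices(hist, tot_count, black_count, white_count):
--     '''Blacking and Whiting out indices same as color balance'''
--
--     black_ind = 0
--     white_ind = 255
--     co = 0
--     for i in range(len(hist)):
--         co += hist[i]
--         if co > black_count:
--             black_ind = i
--             break
--
--     co = 0
--     for i in range(len(hist) - 1, -1, -1):
--         co += hist[i]
--         if co > (tot_count - white_count):
--             white_ind = i
--             break
--
--     return [black_ind, white_ind]
-- ===== SOURCE B (Python) =====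
-- from itertools import accumulate
--
-- def get_black_white_indices(hist, tot_count, black_count, white_count):
--     '''Blacking and Whiting out indices same as color balance'''
--     cum = list(accumulate(hist))
--     total = cum[-1] if cum else 0
--     black_ind = next((i for i, c in enumerate(cum) if c > black_count), 0)
--     thr = tot_count - white_count
--     white_ind = 255
--     prev = 0
--     for i, c in enumerate(cum):
--         if total - prev > thr:   # total - prev == hist[i] + ... + hist[-1]
--             white_ind = i
--         prev = c
--     return [black_ind, white_ind]
-- ===== Notes on version B (the rewrite author's own statement) =====
-- stated objective: alternative
-- what changed: B precomputes the cumulative-sum array once with itertools.accumulate and then finds black_ind as the first index whose prefix sum exceeds black_count and white_ind as the last index whose suffix count (total minus prefix-before) exceeds tot_count - white_count by a single forward last-match scan, instead of A's two accumulate-and-break loops (the second running backward).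
import Mathlib
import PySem

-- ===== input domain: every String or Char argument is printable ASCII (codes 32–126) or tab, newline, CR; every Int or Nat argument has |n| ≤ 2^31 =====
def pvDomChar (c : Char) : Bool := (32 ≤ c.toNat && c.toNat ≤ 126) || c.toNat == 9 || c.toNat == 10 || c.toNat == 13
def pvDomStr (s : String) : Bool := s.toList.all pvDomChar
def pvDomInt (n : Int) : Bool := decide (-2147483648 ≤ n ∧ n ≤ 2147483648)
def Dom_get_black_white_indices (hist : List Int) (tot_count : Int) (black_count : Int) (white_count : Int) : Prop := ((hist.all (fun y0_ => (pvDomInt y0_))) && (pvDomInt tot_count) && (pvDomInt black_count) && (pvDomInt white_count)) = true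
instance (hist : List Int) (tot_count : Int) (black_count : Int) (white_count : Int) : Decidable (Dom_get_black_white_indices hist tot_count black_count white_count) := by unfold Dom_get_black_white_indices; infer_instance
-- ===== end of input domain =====

-- B replaces A's two accumulate-and-break loops (the second backward) by one precomputed
-- cumulative-sum array scanned forward (first prefix crossing / last suffix crossing);
-- objective: alternative decomposition of the same O(n) task.


-- ===== PORT A =====
-- A's first loop: accumulate and break at the first prefix sum > black_count, default 0.
def pvGoBlack (l : List Int) (bc : Int) (co : Int) (i : Int) : Int :=
  match l with
  | [] => 0
  | h :: t => if co + h > bc then i else pvGoBlack t bc (co + h) (i + 1)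

-- A's second loop: walk the histogram backward (here: its reverse forward),
-- accumulate and break at the first suffix sum > thr, default 255.
def pvGoWhite (l : List Int) (thr : Int) (co : Int) (i : Int) : Int :=
  match l with
  | [] => 255
  | h :: t => if co + h > thr then i else pvGoWhite t thr (co + h) (i - 1)

def get_black_white_indices (hist : List Int) (tot_count : Int) (black_count : Int) (white_count : Int) : List Int :=
  [pvGoBlack hist black_count 0 0,
   pvGoWhite hist.reverse (tot_count - white_count) 0 ((hist.length : Int) - 1)]

-- ===== PORT B =====
-- cum = list(accumulate(hist)) with running sum s
def pvCumsum (l : List Int) (s : Int) : List Int :=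
  match l with
  | [] => []
  | h :: t => (s + h) :: pvCumsum t (s + h)

-- next((i for i, c in enumerate(cum) if c > black_count), 0)
def pvFindBlack (cs : List Int) (bc : Int) (i : Int) : Int :=
  match cs with
  | [] => 0
  | c :: t => if c > bc then i else pvFindBlack t bc (i + 1)

-- the forward last-match loop over (i, c) in enumerate(cum), carrying prev and white_ind (w)
def pvWhiteFold (cs : List Int) (total : Int) (thr : Int) (prev : Int) (i : Int) (w : Int) : Int :=
  match cs with
  | [] => w
  | c :: t => pvWhiteFold t total thr c (i + 1) (if total - prev > thr then i else w)

def get_black_white_indices_alt (hist : List Int) (tot_count : Int) (black_count : Int) (white_count : Int) : List Int :=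
  let cum := pvCumsum hist 0
  let total := cum.getLastD 0
  [pvFindBlack cum black_count 0,
   pvWhiteFold cum total (tot_count - white_count) 0 0 255]

-- ===== PRECONDITION & SPEC =====
def Spec_get_black_white_indices (hist : List Int) (tot_count : Int) (black_count : Int) (white_count : Int) (out : List Int) : Prop := out = get_black_white_indices_alt hist tot_count black_count white_count
instance (hist : List Int) (tot_count : Int) (black_count : Int) (white_count : Int) (out : List Int) : Decidable (Spec_get_black_white_indices hist tot_count black_count white_count out) := by unfold Spec_get_black_white_indices; infer_instance

-- ===== CLAIM (what is proved, stated in full; the proofs are below) =====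
def Claim_equal_get_black_white_indices : Prop := ∀ (hist : List Int) (tot_count : Int) (black_count : Int) (white_count : Int), Dom_get_black_white_indices hist tot_count black_count white_count → Spec_get_black_white_indices hist tot_count black_count white_count (get_black_white_indices hist tot_count black_count white_count)

-- ===== LEMMAS AND PROOFS =====

-- ---- black side ----
lemma pvGoBlack_eq_findBlack (l : List Int) : ∀ (bc co i : Int),
    pvGoBlack l bc co i = pvFindBlack (pvCumsum l co) bc i := by
  induction l with
  | nil => intro bc co i; simp [pvGoBlack, pvCumsum, pvFindBlack]
  | cons h t ih =>
    intro bc co i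
    simp only [pvGoBlack, pvCumsum, pvFindBlack]
    split <;> simp [ih]

-- ---- abstract first/last index machinery on Bool flag lists ----
def pvFirstIdxFrom (ts : List Bool) (i : Int) (d : Int) : Int :=
  match ts with
  | [] => d
  | b :: t => if b then i else pvFirstIdxFrom t (i - 1) d

def pvLastIdxFrom (ts : List Bool) (i : Int) (w : Int) : Int :=
  match ts with
  | [] => w
  | b :: t => pvLastIdxFrom t (i + 1) (if b then i else w)

lemma pvFirstIdxFrom_append (xs : List Bool) : ∀ (ys : List Bool) (i d : Int),
    pvFirstIdxFrom (xs ++ ys) i d = pvFirstIdxFrom xs i (pvFirstIdxFrom ys (i - xs.length) d) := by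
  induction xs with
  | nil => intro ys i d; simp [pvFirstIdxFrom]
  | cons b t ih =>
    intro ys i d
    simp only [List.cons_append, pvFirstIdxFrom]
    split
    · rfl
    · rw [ih]
      have : i - 1 - (t.length : Int) = i - ((t.length : Int) + 1) := by omega
      simp [this]

lemma pvFirst_reverse_eq_last (ts : List Bool) : ∀ (i0 d : Int),
    pvFirstIdxFrom ts.reverse (i0 + ts.length - 1) d = pvLastIdxFrom ts i0 d := by
  induction ts with
  | nil => intro i0 d; simp [pvFirstIdxFrom, pvLastIdxFrom]
  | cons b t ih =>
    intro i0 d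
    rw [List.reverse_cons, pvFirstIdxFrom_append]
    have h1 : i0 + ((b :: t).length : Int) - 1 = i0 + (t.length : Int) := by
      simp; omega
    have h2 : i0 + (t.length : Int) - (t.reverse.length : Int) = i0 := by
      simp
    rw [h1, h2]
    have h3 : pvFirstIdxFrom [b] i0 d = if b then i0 else d := by
      simp [pvFirstIdxFrom]
    rw [h3]
    have h4 : i0 + (t.length : Int) = (i0 + 1) + (t.length : Int) - 1 := by omega
    rw [h4, ih]
    rfl

-- ---- flag lists for the two white scans ----
def pvTests (thr : Int) (T : Int) (l : List Int) (s : Int) : List Bool :=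
  match l with
  | [] => []
  | h :: t => decide (T - s > thr) :: pvTests thr T t (s + h)

def pvTsA (thr : Int) (r : List Int) (c : Int) : List Bool :=
  match r with
  | [] => []
  | h :: t => decide (c + h > thr) :: pvTsA thr t (c + h)

lemma pvTests_length (thr T : Int) (l : List Int) : ∀ (s : Int),
    (pvTests thr T l s).length = l.length := by
  induction l with
  | nil => intro s; simp [pvTests]
  | cons h t ih => intro s; simp [pvTests, ih]

lemma pvTests_append (thr T : Int) (l : List Int) (a : Int) : ∀ (s : Int),
    pvTests thr T (l ++ [a]) s = pvTests thr T l s ++ [decide (T - (s + l.sum) > thr)] := by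
  induction l with
  | nil => intro s; simp [pvTests]
  | cons h t ih =>
    intro s
    simp only [List.cons_append, pvTests, ih, List.sum_cons]
    have h1 : s + h + t.sum = s + (h + t.sum) := by ring
    rw [h1]
    rfl

lemma pvTsA_reverse (thr s : Int) (l : List Int) : ∀ (c : Int),
    pvTsA thr l.reverse c = (pvTests thr (s + l.sum + c) l s).reverse := by
  induction l using List.reverseRecOn with
  | nil => intro c; simp [pvTsA, pvTests]
  | append_singleton l' a ih =>
    intro c
    rw [List.reverse_append, pvTests_append]
    simp only [List.singleton_append, List.reverse_append,
      List.reverse_cons, List.reverse_nil, List.nil_append, List.sum_append,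
      List.sum_cons, List.sum_nil, pvTsA]
    have hT : s + (l'.sum + (a + 0)) + c = s + l'.sum + (a + c) := by ring
    rw [hT]
    have hd : s + l'.sum + (a + c) - (s + l'.sum) = a + c := by ring
    rw [hd]
    have hca : c + a = a + c := by ring
    rw [hca, ih (a + c)]

lemma pvGoWhite_eq_first (r : List Int) : ∀ (thr co i : Int),
    pvGoWhite r thr co i = pvFirstIdxFrom (pvTsA thr r co) i 255 := by
  induction r with
  | nil => intro thr co i; simp [pvGoWhite, pvTsA, pvFirstIdxFrom]
  | cons h t ih =>
    intro thr co i
    simp only [pvGoWhite, pvTsA, pvFirstIdxFrom]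
    split <;> rename_i hh
    · simp [hh]
    · simp [hh, ih]

lemma pvWhiteFold_eq_last (l : List Int) : ∀ (total thr s i w : Int),
    pvWhiteFold (pvCumsum l s) total thr s i w = pvLastIdxFrom (pvTests thr total l s) i w := by
  induction l with
  | nil => intro total thr s i w; simp [pvCumsum, pvWhiteFold, pvTests, pvLastIdxFrom]
  | cons h t ih =>
    intro total thr s i w
    simp only [pvCumsum, pvWhiteFold, pvTests, pvLastIdxFrom, ih]
    by_cases hc : total - s > thr <;> simp [hc]

lemma pvCumsum_getLastD (l : List Int) : ∀ (s : Int), (pvCumsum l s).getLastD s = s + l.sum := by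
  induction l with
  | nil => intro s; simp [pvCumsum]
  | cons h t ih =>
    intro s
    simp only [pvCumsum, List.getLastD_cons, ih, List.sum_cons]
    ring

lemma pvCumsum_getLastD_zero (l : List Int) : (pvCumsum l 0).getLastD 0 = l.sum := by
  have := pvCumsum_getLastD l 0
  omega

lemma white_sides_eq (hist : List Int) (thr : Int) :
    pvGoWhite hist.reverse thr 0 ((hist.length : Int) - 1)
      = pvWhiteFold (pvCumsum hist 0) ((pvCumsum hist 0).getLastD 0) thr 0 0 255 := by
  rw [pvGoWhite_eq_first, pvTsA_reverse thr 0 hist 0, pvCumsum_getLastD_zero,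
      pvWhiteFold_eq_last]
  have h1 : (0 : Int) + hist.sum + 0 = hist.sum := by ring
  rw [h1]
  have h2 : (hist.length : Int) - 1
      = 0 + ((pvTests thr hist.sum hist 0).length : Int) - 1 := by
    rw [pvTests_length]; omega
  rw [h2, pvFirst_reverse_eq_last]

-- ===== VERDICT (by name: the statement is the Claim_ definition above) =====
theorem get_black_white_indices_spec : Claim_equal_get_black_white_indices := by
  intro hist tot_count black_count white_count _
  unfold Spec_get_black_white_indices get_black_white_indices get_black_white_indices_alt
  simp only []
  rw [pvGoBlack_eq_findBlack, white_sides_eq]
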